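-- pv_equiv track=rewrite | github.com/Roflkemper/chat-bot-v2 | scripts/migrate_bot_ids.py | _next_seq
-- ===== SOURCE A (Python) =====
-- def _next_seq(existing: dict, platform: str, side: str, symbol: str) -> int:
--     """Smallest seq number not yet used for the (platform, side, symbol) tuple."""
--     used: set[int] = set()
--     prefix = f"{platform}:{side}:{symbol}:"
--     for uid in existing.get("bots", {}).keys():
--         if uid.startswith(prefix):
--             try:
--                 used.add(int(uid.split(":")[-1]))
--             except ValueError:
--                 pass
--     seq = 1
--     while seq in used:
--         seq += 1
--     return seq
-- ===== SOURCE B (Python) =====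
-- def _parse_seq(uid: str):
--     """int(last ':'-separated field of uid), or None if it is not an int."""
--     try:
--         return int(uid.split(":")[-1])
--     except ValueError:
--         return None
--
--
-- def _next_seq(existing: dict, platform: str, side: str, symbol: str) -> int:
--     """Smallest seq number not yet used for the (platform, side, symbol) tuple."""
--     prefix = f"{platform}:{side}:{symbol}:"
--     seqs = sorted(
--         v
--         for uid in existing.get("bots", {})
--         if uid.startswith(prefix)
--         for v in (_parse_seq(uid),)
--         if v is not None
--     )
--     candidate = 1
--     for v in seqs:
--         if v < candidate:
--             continue
--         if v == candidate:
--             candidate += 1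
--         else:
--             break
--     return candidate
-- ===== Notes on version B (the rewrite author's own statement) =====
-- stated objective: alternative
-- what changed: Replaces the hash-set plus while-probe mex search with a filtered comprehension collected into a sorted list that is scanned once for the first gap >= 1.
import Mathlib
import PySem

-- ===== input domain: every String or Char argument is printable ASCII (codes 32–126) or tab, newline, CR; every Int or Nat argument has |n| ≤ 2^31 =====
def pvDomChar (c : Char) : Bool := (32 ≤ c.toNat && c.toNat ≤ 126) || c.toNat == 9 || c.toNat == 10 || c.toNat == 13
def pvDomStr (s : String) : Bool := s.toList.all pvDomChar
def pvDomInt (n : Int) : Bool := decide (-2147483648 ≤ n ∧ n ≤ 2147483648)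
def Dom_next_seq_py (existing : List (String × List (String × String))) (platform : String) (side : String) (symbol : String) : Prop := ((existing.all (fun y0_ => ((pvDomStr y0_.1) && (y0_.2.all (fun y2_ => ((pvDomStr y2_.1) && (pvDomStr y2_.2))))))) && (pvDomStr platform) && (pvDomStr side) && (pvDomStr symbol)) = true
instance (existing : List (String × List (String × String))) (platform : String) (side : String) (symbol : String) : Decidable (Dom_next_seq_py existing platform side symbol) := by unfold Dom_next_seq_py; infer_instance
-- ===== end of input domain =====

-- B replaces A's hash-set + while-probe with a sorted list scanned once for the first gap ≥ 1 (alternative decomposition; return value only, no mutation in either program).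

-- ===== PORT A =====
-- `while seq in used: seq += 1` : Python's loop terminates because `used` is finite;
-- `used.length + 1` probes are exact fuel (after k successful probes starting at 1 the
-- values 1..k are distinct members of `used`, so at most `used.length` probes succeed).
def pvProbe (used : PySem.Set Int) : Nat → Int → Int
  | 0, seq => seq
  | fuel + 1, seq => if seq ∈ used then pvProbe used fuel (seq + 1) else seq

def next_seq_py (existing : List (String × List (String × String))) (platform : String) (side : String) (symbol : String) : Int :=
  -- pfx = f"{platform}:{side}:{symbol}:"
  let pfx : List Char := platform.toList ++ ':' :: side.toList ++ ':' :: symbol.toList ++ [':']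
  -- existing.get("bots", {})
  let bots := PySem.Dict.getD (PySem.Dict.mk existing) "bots" []
  -- for uid in ….keys(): iteration over dict keys = first-occurrence dedup of the fsts
  let used : PySem.Set Int := (PySem.List.dedup (bots.map Prod.fst)).foldl
    (fun used uid =>
      if PySem.Chars.startswith uid.toList pfx then
        -- int(uid.split(":")[-1]); split(":") is never empty, so [-1] never raises
        match PySem.Int.ofChars? (PySem.List.pyGetD (PySem.Chars.splitOn uid.toList [':']) (-1) []) with
        | some n => PySem.Set.add used n
        | none => used
      else used) PySem.Set.empty
  pvProbe used (used.length + 1) 1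

-- ===== PORT B =====
-- _parse_seq(uid) from Source B
def pvParseSeq (uid : List Char) : Option Int :=
  PySem.Int.ofChars? (PySem.List.pyGetD (PySem.Chars.splitOn uid [':']) (-1) [])

-- Source B's final for-loop over the sorted list (continue / += 1 / break)
def pvScan : List Int → Int → Int
  | [], candidate => candidate
  | v :: rest, candidate =>
    if v < candidate then pvScan rest candidate
    else if v = candidate then pvScan rest (candidate + 1)
    else candidate

def next_seq_py_alt (existing : List (String × List (String × String))) (platform : String) (side : String) (symbol : String) : Int :=
  let pfx : List Char := platform.toList ++ ':' :: side.toList ++ ':' :: symbol.toList ++ [':']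
  let bots := PySem.Dict.getD (PySem.Dict.mk existing) "bots" []
  -- sorted(v for uid in … if uid.startswith(pfx) for v in (_parse_seq(uid),) if v is not None)
  let seqs := PySem.List.sorted
    ((PySem.List.dedup (bots.map Prod.fst)).filterMap
      (fun uid => if PySem.Chars.startswith uid.toList pfx then pvParseSeq uid.toList else none))
    (fun x => x) false
  pvScan seqs 1

-- ===== PRECONDITION & SPEC =====
def Spec_next_seq_py (existing : List (String × List (String × String))) (platform : String) (side : String) (symbol : String) (out : Int) : Prop := out = next_seq_py_alt existing platform side symbol
instance (existing : List (String × List (String × String))) (platform : String) (side : String) (symbol : String) (out : Int) : Decidable (Spec_next_seq_py existing platform side symbol out) := by unfold Spec_next_seq_py; infer_instance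

-- ===== CLAIM (what is proved, stated in full; the proofs are below) =====
def Claim_equal_next_seq_py : Prop := ∀ (existing : List (String × List (String × String))) (platform : String) (side : String) (symbol : String), Dom_next_seq_py existing platform side symbol → Spec_next_seq_py existing platform side symbol (next_seq_py existing platform side symbol)

-- ===== LEMMAS AND PROOFS =====

-- both results satisfy: first integer ≥ c outside the collected values
def pvMexSpec (members : Int → Prop) (c r : Int) : Prop :=
  c ≤ r ∧ ¬ members r ∧ ∀ k, c ≤ k → k < r → members k

theorem pvMexSpec_unique (m1 m2 : Int → Prop) (hm : ∀ x, m1 x ↔ m2 x) (c r1 r2 : Int)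
    (h1 : pvMexSpec m1 c r1) (h2 : pvMexSpec m2 c r2) : r1 = r2 := by
  obtain ⟨hc1, hn1, ha1⟩ := h1
  obtain ⟨hc2, hn2, ha2⟩ := h2
  rcases lt_trichotomy r1 r2 with h | h | h
  · exact absurd ((hm r1).mpr (ha2 r1 hc1 h)) hn1
  · exact h
  · exact absurd ((hm r2).mp (ha1 r2 hc2 h)) hn2

theorem pvScan_spec (L : List Int) (hL : L.Pairwise (· ≤ ·)) (c : Int) :
    pvMexSpec (· ∈ L) c (pvScan L c) := by
  induction L generalizing c with
  | nil => exact ⟨le_refl c, by simp [pvScan], fun k h1 h2 => absurd h2 (by simp only [pvScan] at h2 ⊢; omega)⟩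
  | cons v rest ih =>
    have hrest := (List.pairwise_cons.mp hL).2
    have hhead := (List.pairwise_cons.mp hL).1
    by_cases h1 : v < c
    · obtain ⟨hc, hn, ha⟩ := ih hrest c
      refine ⟨by simp only [pvScan, if_pos h1]; exact hc, ?_, ?_⟩
      · simp only [pvScan, if_pos h1]
        intro hmem
        rcases List.mem_cons.mp hmem with h | h
        · omega
        · exact hn h
      · intro k hk1 hk2
        simp only [pvScan, if_pos h1] at hk2
        exact List.mem_cons_of_mem _ (ha k hk1 hk2)
    · by_cases h2 : v = c
      · obtain ⟨hc, hn, ha⟩ := ih hrest (c + 1)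
        refine ⟨?_, ?_, ?_⟩
        · simp only [pvScan, if_neg h1, if_pos h2]; omega
        · simp only [pvScan, if_neg h1, if_pos h2]
          intro hmem
          rcases List.mem_cons.mp hmem with h | h
          · omega
          · exact hn h
        · intro k hk1 hk2
          simp only [pvScan, if_neg h1, if_pos h2] at hk2
          by_cases hk : k = c
          · exact hk ▸ h2 ▸ List.mem_cons_self
          · exact List.mem_cons_of_mem _ (ha k (by omega) hk2)
      · refine ⟨?_, ?_, ?_⟩
        · simp only [pvScan, if_neg h1, if_neg h2]; omega
        · simp only [pvScan, if_neg h1, if_neg h2]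
          intro hmem
          rcases List.mem_cons.mp hmem with h | h
          · exact h2 h.symm
          · have := hhead _ h; omega
        · intro k hk1 hk2
          simp only [pvScan, if_neg h1, if_neg h2] at hk2
          omega

theorem pvCount_drop (S : List Int) (c : Int) (hnd : S.Nodup) (hc : c ∈ S) :
    S.countP (fun x => decide (c + 1 ≤ x)) + 1 ≤ S.countP (fun x => decide (c ≤ x)) := by
  induction S with
  | nil => simp at hc
  | cons a rest ih =>
    have hnd' := (List.nodup_cons.mp hnd).2
    have hmono : rest.countP (fun x => decide (c + 1 ≤ x)) ≤ rest.countP (fun x => decide (c ≤ x)) :=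
      List.countP_mono_left (fun x _ hx => by simp only [decide_eq_true_eq] at hx ⊢; omega)
    simp only [List.countP_cons]
    rcases List.mem_cons.mp hc with h | h
    · split_ifs with h1 h2 <;> simp only [decide_eq_true_eq] at * <;> omega
    · have hIH := ih hnd' h
      split_ifs with h1 h2 <;> simp only [decide_eq_true_eq] at * <;> omega

theorem pvProbe_spec (S : PySem.Set Int) (hnd : S.Nodup) :
    ∀ (fuel : Nat) (c : Int), S.countP (fun x => decide (c ≤ x)) ≤ fuel →
      pvMexSpec (· ∈ S) c (pvProbe S fuel c) := by
  intro fuel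
  induction fuel with
  | zero =>
    intro c hcnt
    refine ⟨le_refl _, ?_, fun k h1 h2 => absurd h2 (by simp only [pvProbe] at h2 ⊢; omega)⟩
    intro hmem
    have : 0 < S.countP (fun x => decide (c ≤ x)) := by
      rw [List.countP_pos_iff]; exact ⟨c, hmem, by simp⟩
    omega
  | succ n ih =>
    intro c hcnt
    by_cases hmem : c ∈ S
    · have hdrop := pvCount_drop S c hnd hmem
      obtain ⟨hc, hn, ha⟩ := ih (c + 1) (by omega)
      refine ⟨?_, ?_, ?_⟩
      · simp only [pvProbe, if_pos hmem]; omega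
      · simpa only [pvProbe, if_pos hmem] using hn
      · intro k hk1 hk2
        simp only [pvProbe, if_pos hmem] at hk2
        by_cases hk : k = c
        · exact hk ▸ hmem
        · exact ha k (by omega) hk2
    · refine ⟨?_, ?_, ?_⟩
      · simp only [pvProbe, if_neg hmem]; omega
      · simpa only [pvProbe, if_neg hmem] using hmem
      · intro k h1 h2; simp only [pvProbe, if_neg hmem] at h2; omega

-- the collection loop of A builds exactly the set of values B's comprehension collects
theorem pvCollect_mem (pfx : List Char) (keys : List String) (acc : PySem.Set Int) (x : Int) :
    (x ∈ keys.foldl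
      (fun used uid =>
        if PySem.Chars.startswith uid.toList pfx then
          match PySem.Int.ofChars? (PySem.List.pyGetD (PySem.Chars.splitOn uid.toList [':']) (-1) []) with
          | some n => PySem.Set.add used n
          | none => used
        else used) acc) ↔
    (x ∈ acc ∨ x ∈ keys.filterMap
      (fun uid => if PySem.Chars.startswith uid.toList pfx then pvParseSeq uid.toList else none)) := by
  induction keys generalizing acc with
  | nil => simp
  | cons uid rest ih =>
    simp only [List.foldl_cons, List.filterMap_cons]
    by_cases hp : PySem.Chars.startswith uid.toList pfx
    · simp only [if_pos hp, pvParseSeq]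
      cases hv : PySem.Int.ofChars? (PySem.List.pyGetD (PySem.Chars.splitOn uid.toList [':']) (-1) []) with
      | none => simp [ih, pvParseSeq]
      | some n =>
        rw [ih]
        simp [pvParseSeq, PySem.Set.mem_add]
        tauto
    · simp only [if_neg hp]
      exact ih acc

theorem pvCollect_nodup (pfx : List Char) (keys : List String) (acc : PySem.Set Int) (hnd : acc.Nodup) :
    (keys.foldl
      (fun used uid =>
        if PySem.Chars.startswith uid.toList pfx then
          match PySem.Int.ofChars? (PySem.List.pyGetD (PySem.Chars.splitOn uid.toList [':']) (-1) []) with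
          | some n => PySem.Set.add used n
          | none => used
        else used) acc).Nodup := by
  induction keys generalizing acc with
  | nil => exact hnd
  | cons uid rest ih =>
    simp only [List.foldl_cons]
    by_cases hp : PySem.Chars.startswith uid.toList pfx
    · simp only [if_pos hp]
      cases hv : PySem.Int.ofChars? (PySem.List.pyGetD (PySem.Chars.splitOn uid.toList [':']) (-1) []) with
      | none => exact ih acc hnd
      | some n => exact ih (PySem.Set.add acc n) (PySem.Set.nodup_add _ _ hnd)
    · simp only [if_neg hp]
      exact ih acc hnd

-- ===== VERDICT (by name: the statement is the Claim_ definition above) =====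
theorem next_seq_py_spec : Claim_equal_next_seq_py := by
  intro existing platform side symbol _
  unfold Spec_next_seq_py next_seq_py next_seq_py_alt
  set pfx : List Char := platform.toList ++ ':' :: side.toList ++ ':' :: symbol.toList ++ [':'] with hpfx
  set keys := PySem.List.dedup ((PySem.Dict.getD (PySem.Dict.mk existing) "bots" []).map Prod.fst) with hkeys
  set L := keys.filterMap
      (fun uid => if PySem.Chars.startswith uid.toList pfx then pvParseSeq uid.toList else none) with hL
  set S := keys.foldl
      (fun used uid =>
        if PySem.Chars.startswith uid.toList pfx then
          match PySem.Int.ofChars? (PySem.List.pyGetD (PySem.Chars.splitOn uid.toList [':']) (-1) []) with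
          | some n => PySem.Set.add used n
          | none => used
        else used) PySem.Set.empty with hS
  have hndS : S.Nodup := pvCollect_nodup pfx keys PySem.Set.empty List.nodup_nil
  have hmem : ∀ x, x ∈ S ↔ x ∈ PySem.List.sorted L (fun x => x) false := by
    intro x
    rw [PySem.List.mem_sorted]
    rw [hS, pvCollect_mem]
    simp [hL]
  have hsorted : (PySem.List.sorted L (fun x => x) false).Pairwise (· ≤ ·) := by
    have := PySem.List.sorted_pairwise (xs := L) (key := fun x => x)
    simpa using this
  exact pvMexSpec_unique _ _ hmem 1 _ _
    (pvProbe_spec S hndS (S.length + 1) 1 (by have := List.countP_le_length (l := S) (p := fun x => decide ((1:Int) ≤ x)); omega))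
    (pvScan_spec _ hsorted 1)
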